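-- pv_equiv track=rewrite | github.com/toasa/tessoku-book | 42b.py | solve_b42_slow
-- ===== SOURCE A (Python) =====
-- def solve_b42_slow(cards):
--     N = len(cards)
--
--     res = 0
--     for i in range(1, 2**N):
--         pick = []
--         for j in range(N):
--             if (1 << j) & i == (1 << j):
--                 pick.append(cards[j])
--
--         total_front = 0
--         total_back = 0
--         for c in pick:
--             total_front += c[0]
--             total_back += c[1]
--
--         res = max(res, abs(total_front)+abs(total_back))
--
--     return res
-- ===== SOURCE B (Python) =====
-- def solve_b42_slow(cards):
--     # max over non-empty subsets of |sum of fronts| + |sum of backs|: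
--     # |x| + |y| = max over sign pairs (s, t) of s*x + t*y, so for each of the
--     # four sign pairs take every card whose signed contribution is positive.
--     def gain(s, t):
--         return sum(max(0, s * a + t * b) for a, b in cards)
--     return max(gain(1, 1), gain(1, -1), gain(-1, 1), gain(-1, -1))
-- ===== Notes on version B (the rewrite author's own statement) =====
-- stated objective: faster
-- what changed: replaces the 2^N subset enumeration by the identity |x|+|y| = max over sign pairs s,t of s*x+t*y: for each of the four sign pairs, greedily sum the positive signed contributions s*a+t*b in one pass
import Mathlib
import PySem

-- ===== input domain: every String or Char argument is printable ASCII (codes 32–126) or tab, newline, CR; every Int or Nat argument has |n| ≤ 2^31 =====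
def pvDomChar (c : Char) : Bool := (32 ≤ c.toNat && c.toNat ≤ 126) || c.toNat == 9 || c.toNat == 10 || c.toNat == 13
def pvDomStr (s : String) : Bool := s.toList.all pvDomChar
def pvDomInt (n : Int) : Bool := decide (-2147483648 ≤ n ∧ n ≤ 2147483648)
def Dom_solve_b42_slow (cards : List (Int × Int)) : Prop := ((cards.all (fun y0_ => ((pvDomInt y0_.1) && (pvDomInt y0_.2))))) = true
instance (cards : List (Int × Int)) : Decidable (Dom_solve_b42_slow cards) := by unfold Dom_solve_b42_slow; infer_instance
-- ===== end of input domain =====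

-- B replaces A's 2^N subset enumeration by |x|+|y| = max over sign pairs (s,t) of s*x+t*y,
-- summing the positive signed contributions s*a+t*b for each of the four sign pairs (objective: faster).

-- ===== PORT A =====
def solve_b42_slow (cards : List (Int × Int)) : Int :=
  let N : Int := (cards.length : Int)
  (PySem.List.pyRange 1 ((2 : Int) ^ N.toNat) 1).foldl (fun res i =>
    let pick := (PySem.List.pyRange 0 N 1).foldl (fun pick j =>
      if PySem.Int.band ((1 : Int) <<< j.toNat) i == (1 : Int) <<< j.toNat then
        pick ++ [PySem.List.pyGetD cards j (0, 0)]
      else pick) ([] : List (Int × Int))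
    let total_front := pick.foldl (fun acc c => acc + c.1) 0
    let total_back := pick.foldl (fun acc c => acc + c.2) 0
    max res (|total_front| + |total_back|)) 0

-- ===== PORT B =====
-- B-side helper: sum of positive signed contributions for sign pair (s, t)
def pvGain (cards : List (Int × Int)) (s t : Int) : Int :=
  cards.foldl (fun acc c => acc + max 0 (s * c.1 + t * c.2)) 0

def solve_b42_slow_alt (cards : List (Int × Int)) : Int :=
  max (max (max (pvGain cards 1 1) (pvGain cards 1 (-1)))
        (pvGain cards (-1) 1)) (pvGain cards (-1) (-1))

-- ===== PRECONDITION & SPEC =====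
def Spec_solve_b42_slow (cards : List (Int × Int)) (out : Int) : Prop := out = solve_b42_slow_alt cards
instance (cards : List (Int × Int)) (out : Int) : Decidable (Spec_solve_b42_slow cards out) := by unfold Spec_solve_b42_slow; infer_instance

-- ===== CLAIM (what is proved, stated in full; the proofs are below) =====
def Claim_equal_solve_b42_slow : Prop := ∀ (cards : List (Int × Int)), Dom_solve_b42_slow cards → Spec_solve_b42_slow cards (solve_b42_slow cards)

-- ===== LEMMAS AND PROOFS =====

-- the signed subset sum selected by the bits of n, for projection g
def pvSubG (g : Int × Int → Int) : List (Int × Int) → Nat → Int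
  | [], _ => 0
  | c :: cs, n => (if n % 2 = 1 then g c else 0) + pvSubG g cs (n / 2)

-- the value A computes for bitmask n
def pvVal (cards : List (Int × Int)) (n : Nat) : Int :=
  |pvSubG Prod.fst cards n| + |pvSubG Prod.snd cards n|

-- the bitmask of the cards with positive contribution for sign pair (s, t)
def pvMask (s t : Int) : List (Int × Int) → Nat
  | [] => 0
  | c :: cs => (if 0 < s * c.1 + t * c.2 then 1 else 0) + 2 * pvMask s t cs

theorem pvSubG_zero (g : Int × Int → Int) (cs : List (Int × Int)) : pvSubG g cs 0 = 0 := by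
  induction cs with
  | nil => rfl
  | cons c cs ih => simp [pvSubG, ih]

theorem pvVal_zero (cards : List (Int × Int)) : pvVal cards 0 = 0 := by
  simp [pvVal, pvSubG_zero]

-- A's inner bit test, in Nat form
theorem pv_bit_test (j : Nat) (i : Int) (hi : 0 ≤ i) :
    (PySem.Int.band ((1 : Int) <<< (j : Int)) i = (1 : Int) <<< (j : Int)) ↔ i.toNat.testBit j := by
  have h1 : (1 : Int) <<< (j : Int) = ((2 ^ j : Nat) : Int) := Int.one_shiftLeft j
  rw [h1, PySem.Int.band_of_nonneg (by positivity) hi]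
  simp only [Int.toNat_natCast, Nat.cast_inj, Nat.and_comm, Nat.and_two_pow]
  cases h : i.toNat.testBit j <;> simp
  exact fun h' => (Nat.two_pow_pos j).ne' h'.symm

-- the per-projection sum over the bit-selected sublist
theorem pv_filter_sum (g : Int × Int → Int) (cs : List (Int × Int)) (n : Nat) :
    ((((List.range cs.length).filter (fun j => n.testBit j)).map
        (fun j => g (cs.getD j (0, 0)))).sum) = pvSubG g cs n := by
  induction cs generalizing n with
  | nil => simp [pvSubG]
  | cons c cs ih =>
    rw [List.length_cons, List.range_succ_eq_map, List.filter_cons, List.filter_map]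
    have hcomp : (List.range cs.length).filter ((fun j => n.testBit j) ∘ Nat.succ)
        = (List.range cs.length).filter (fun j => (n/2).testBit j) := by
      apply List.filter_congr; intro j _; simp [Function.comp, Nat.testBit_add_one]
    rw [hcomp]
    by_cases h0 : n.testBit 0
    · have hmod : n % 2 = 1 := by simpa [Nat.testBit_zero] using h0
      simp only [h0, List.map_cons, List.map_map, Function.comp_def,
        List.sum_cons, List.getD_cons_succ, ih, pvSubG, hmod, if_pos]
      simp
    · have hmod : ¬ n % 2 = 1 := by simpa [Nat.testBit_zero] using h0
      simp only [h0, Bool.false_eq_true, if_false, List.map_map, Function.comp_def,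
        List.getD_cons_succ, ih, pvSubG]
      simp [hmod]

-- A's pick list for loop counter i is the bit-selected sublist
theorem pv_pick_eq (cards : List (Int × Int)) (i : Int) (hi : 0 ≤ i) :
    ((PySem.List.pyRange 0 (cards.length : Int) 1).foldl (fun pick j =>
        if PySem.Int.band ((1 : Int) <<< j.toNat) i == (1 : Int) <<< j.toNat then
          pick ++ [PySem.List.pyGetD cards j (0, 0)]
        else pick) ([] : List (Int × Int)))
      = ((List.range cards.length).filter (fun j => i.toNat.testBit j)).map
          (fun j => cards.getD j (0, 0)) := by
  rw [PySem.List.foldl_append_if]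
  rw [PySem.List.pyRange_zero_nat, List.filter_map, List.map_map]
  simp only [List.nil_append]
  have hfil : (List.range cards.length).filter
        ((fun j => PySem.Int.band ((1 : Int) <<< j.toNat) i == (1 : Int) <<< j.toNat) ∘
          fun k : Nat => (k : Int))
      = (List.range cards.length).filter (fun j => i.toNat.testBit j) := by
    apply List.filter_congr
    intro j _
    have ht := pv_bit_test j i hi
    simp only [Function.comp_def, Int.toNat_natCast]
    cases hb : i.toNat.testBit j
    · have hne : ¬ (PySem.Int.band ((1 : Int) <<< (j : Int)) i = (1 : Int) <<< (j : Int)) := by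
        rw [ht, hb]; simp
      simp only [beq_eq_false_iff_ne, ne_eq]
      exact hne
    · have heq : PySem.Int.band ((1 : Int) <<< (j : Int)) i = (1 : Int) <<< (j : Int) := by
        rw [ht, hb]
      simpa using heq
  rw [hfil]
  apply List.map_congr_left
  intro j _
  simp

-- A equals the fold of pvVal over all bitmasks
theorem pv_A_eq (cards : List (Int × Int)) :
    solve_b42_slow cards
      = (List.range (2 ^ cards.length)).foldl (fun r n => max r (pvVal cards n)) 0 := by
  unfold solve_b42_slow
  simp only [Int.toNat_natCast]
  have hcast : ((2 : Int) ^ cards.length) = ((2 ^ cards.length : Nat) : Int) := by push_cast; ring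
  have hM : (((2 : Int) ^ cards.length) - 1).toNat = 2 ^ cards.length - 1 := by
    rw [hcast]; omega
  rw [PySem.List.pyRange_one 1 ((2 : Int) ^ cards.length)]
  rw [hM]
  rw [List.foldl_map]
  have hstep : ∀ (res : Int) (k : Nat),
      (fun (res : Int) (i : Int) =>
        let pick := (PySem.List.pyRange 0 (cards.length : Int) 1).foldl (fun pick j =>
          if PySem.Int.band ((1 : Int) <<< j.toNat) i == (1 : Int) <<< j.toNat then
            pick ++ [PySem.List.pyGetD cards j (0, 0)]
          else pick) ([] : List (Int × Int))
        let total_front := pick.foldl (fun acc c => acc + c.1) 0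
        let total_back := pick.foldl (fun acc c => acc + c.2) 0
        max res (|total_front| + |total_back|)) res (1 + (k : Int))
        = max res (pvVal cards (1 + k)) := by
    intro res k
    have hi : (0 : Int) ≤ 1 + (k : Int) := by positivity
    have htn : ((1 : Int) + (k : Int)).toNat = 1 + k := by omega
    simp only [pv_pick_eq cards (1 + (k : Int)) hi, htn]
    rw [PySem.List.foldl_add, PySem.List.foldl_add, List.map_map, List.map_map]
    simp only [Function.comp_def]
    rw [pv_filter_sum (fun c => c.1) cards (1 + k), pv_filter_sum (fun c => c.2) cards (1 + k)]
    simp [pvVal]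
  simp only [hstep]
  have h1 : 2 ^ cards.length = (2 ^ cards.length - 1) + 1 := by
    have := Nat.one_le_two_pow (n := cards.length); omega
  conv_rhs => rw [h1, List.range_succ_eq_map]
  rw [List.foldl_cons, List.foldl_map]
  simp [pvVal_zero, Nat.succ_eq_add_one, Nat.add_comm]

theorem pvGain_eq (cards : List (Int × Int)) (s t : Int) :
    pvGain cards s t = (cards.map (fun c => max 0 (s * c.1 + t * c.2))).sum := by
  rw [pvGain, PySem.List.foldl_add]; simp

theorem pvGain_nonneg (cards : List (Int × Int)) (s t : Int) : 0 ≤ pvGain cards s t := by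
  rw [pvGain_eq]
  apply List.sum_nonneg
  intro x hx
  rcases List.mem_map.mp hx with ⟨c, _, rfl⟩
  exact le_max_left 0 _

theorem pv_sub_le_gain (cards : List (Int × Int)) (n : Nat) (s t : Int) :
    s * pvSubG Prod.fst cards n + t * pvSubG Prod.snd cards n ≤ pvGain cards s t := by
  rw [pvGain_eq]
  induction cards generalizing n with
  | nil => simp [pvSubG]
  | cons c cs ih =>
    simp only [pvSubG, List.map_cons, List.sum_cons]
    have h1 := ih (n / 2)
    have h2 : s * c.1 + t * c.2 ≤ max 0 (s * c.1 + t * c.2) := le_max_right 0 _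
    have h3 : (0 : Int) ≤ max 0 (s * c.1 + t * c.2) := le_max_left 0 _
    by_cases hm : n % 2 = 1 <;> simp only [hm, if_true, if_false] <;> [nlinarith; nlinarith]

theorem pvVal_le_alt (cards : List (Int × Int)) (n : Nat) :
    pvVal cards n ≤ solve_b42_slow_alt cards := by
  have h11 := pv_sub_le_gain cards n 1 1
  have h1m := pv_sub_le_gain cards n 1 (-1)
  have hm1 := pv_sub_le_gain cards n (-1) 1
  have hmm := pv_sub_le_gain cards n (-1) (-1)
  unfold solve_b42_slow_alt pvVal
  rcases abs_cases (pvSubG Prod.fst cards n) with ⟨e1, _⟩ | ⟨e1, _⟩ <;>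
    rcases abs_cases (pvSubG Prod.snd cards n) with ⟨e2, _⟩ | ⟨e2, _⟩ <;>
      rw [e1, e2] <;> simp only [le_max_iff]
  · exact Or.inl (Or.inl (Or.inl (by linarith)))
  · exact Or.inl (Or.inl (Or.inr (by linarith)))
  · exact Or.inl (Or.inr (by linarith))
  · exact Or.inr (by linarith)

-- the mask of positive contributions realizes the gain
theorem pv_mask_lt (s t : Int) (cards : List (Int × Int)) :
    pvMask s t cards < 2 ^ cards.length := by
  induction cards with
  | nil => simp [pvMask]
  | cons c cs ih =>
    simp only [pvMask, List.length_cons, pow_succ]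
    split_ifs <;> omega

theorem pv_sub_mask (cards : List (Int × Int)) (s t : Int) :
    s * pvSubG Prod.fst cards (pvMask s t cards)
      + t * pvSubG Prod.snd cards (pvMask s t cards) = pvGain cards s t := by
  rw [pvGain_eq]
  induction cards with
  | nil => simp [pvSubG]
  | cons c cs ih =>
    simp only [pvMask, List.map_cons, List.sum_cons]
    by_cases hpos : 0 < s * c.1 + t * c.2
    · have hm : (1 + 2 * pvMask s t cs) % 2 = 1 := by omega
      have hd : (1 + 2 * pvMask s t cs) / 2 = pvMask s t cs := by omega
      simp only [hpos, pvSubG, hm, hd, if_pos]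
      rw [max_eq_right hpos.le]
      linarith
    · have hm : ¬ (0 + 2 * pvMask s t cs) % 2 = 1 := by omega
      have hd : (0 + 2 * pvMask s t cs) / 2 = pvMask s t cs := by omega
      simp only [hpos, if_false, pvSubG, hm, hd]
      rw [max_eq_left (by linarith)]
      simp only [zero_add]
      linarith

-- fold-max toolbox
theorem pv_foldl_max_le (f : Nat → Int) (M : Int) :
    ∀ (l : List Nat) (r : Int), (∀ n ∈ l, f n ≤ M) → r ≤ M →
      l.foldl (fun r n => max r (f n)) r ≤ M := by
  intro l
  induction l with
  | nil => intro r _ hr; simpa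
  | cons a l ih =>
    intro r h hr
    simp only [List.foldl_cons]
    exact ih _ (fun n hn => h n (List.mem_cons_of_mem a hn))
      (max_le hr (h a List.mem_cons_self))

theorem pv_base_le_foldl_max (f : Nat → Int) :
    ∀ (l : List Nat) (r : Int), r ≤ l.foldl (fun r n => max r (f n)) r := by
  intro l
  induction l with
  | nil => intro r; simp
  | cons a l ih =>
    intro r
    simp only [List.foldl_cons]
    exact le_trans (le_max_left r (f a)) (ih (max r (f a)))

theorem pv_le_foldl_max (f : Nat → Int) :
    ∀ (l : List Nat) (r : Int) (n : Nat), n ∈ l →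
      f n ≤ l.foldl (fun r n => max r (f n)) r := by
  intro l
  induction l with
  | nil => intro r n hn; simp at hn
  | cons a l ih =>
    intro r n hn
    simp only [List.foldl_cons]
    rcases List.mem_cons.mp hn with rfl | hn
    · exact le_trans (le_max_right r (f n)) (pv_base_le_foldl_max f l _)
    · exact ih _ n hn

theorem pv_gain_le_fold (cards : List (Int × Int)) (s t : Int)
    (hs : s = 1 ∨ s = -1) (ht : t = 1 ∨ t = -1) :
    pvGain cards s t
      ≤ (List.range (2 ^ cards.length)).foldl (fun r n => max r (pvVal cards n)) 0 := by
  set m := pvMask s t cards with hm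
  have hmem : m ∈ List.range (2 ^ cards.length) :=
    List.mem_range.mpr (pv_mask_lt s t cards)
  have h1 : pvGain cards s t ≤ pvVal cards m := by
    rw [← pv_sub_mask cards s t, pvVal, ← hm]
    set F := pvSubG Prod.fst cards m
    set G := pvSubG Prod.snd cards m
    have hF1 := le_abs_self F
    have hF2 := neg_abs_le F
    have hG1 := le_abs_self G
    have hG2 := neg_abs_le G
    rcases hs with rfl | rfl <;> rcases ht with rfl | rfl <;> nlinarith
  exact le_trans h1 (pv_le_foldl_max _ _ _ m hmem)

-- ===== VERDICT (by name: the statement is the Claim_ definition above) =====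
theorem solve_b42_slow_spec : Claim_equal_solve_b42_slow := by
  intro cards _
  unfold Spec_solve_b42_slow
  rw [pv_A_eq]
  apply le_antisymm
  · exact pv_foldl_max_le _ _ _ _ (fun n _ => pvVal_le_alt cards n)
      (le_trans (pvGain_nonneg cards 1 1)
        (le_trans (le_max_left _ _) (le_trans (le_max_left _ _) (le_max_left _ _))))
  · unfold solve_b42_slow_alt
    apply max_le
    apply max_le
    apply max_le
    · exact pv_gain_le_fold cards 1 1 (Or.inl rfl) (Or.inl rfl)
    · exact pv_gain_le_fold cards 1 (-1) (Or.inl rfl) (Or.inr rfl)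
    · exact pv_gain_le_fold cards (-1) 1 (Or.inr rfl) (Or.inl rfl)
    · exact pv_gain_le_fold cards (-1) (-1) (Or.inr rfl) (Or.inr rfl)
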